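-- pv_equiv track=rewrite | github.com/posl/comment_recommendation | script/mod_gen/2_time/en/121_D/2.py | f
-- ===== SOURCE A (Python) =====
-- def f(a, b):
--     if a == b:
--         return a
--     if a % 2 == 1 and b % 2 == 1:
--         return 1
--     if a % 2 == 0 and b % 2 == 0:
--         return 0
--     if a % 2 == 1 and b % 2 == 0:
--         return f(a + 1, b)
--     if a % 2 == 0 and b % 2 == 1:
--         return f(a, b - 1) ^ b
-- ===== SOURCE B (Python) =====
-- def f(a, b):
--     # Iterative normalization with an xor accumulator instead of self-recursion:
--     # odd a is rounded up, odd b (with even a) is folded into the accumulator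
--     # and rounded down, until a base case returns.
--     acc = 0
--     while True:
--         if a == b:
--             return a ^ acc
--         pa, pb = a % 2, b % 2
--         if pa == pb:
--             return pa ^ acc
--         if pa == 1:
--             a += 1
--         else:
--             acc ^= b
--             b -= 1
-- ===== Notes on version B (the rewrite author's own statement) =====
-- stated objective: alternative
-- what changed: Replaces the self-recursion by an iterative normalization loop over mutable (a, b) with an xor accumulator: odd a is rounded up, odd b (with even a) is xor-folded into the accumulator and rounded down, and a base case returns the state xored with the accumulator.
import Mathlib
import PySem

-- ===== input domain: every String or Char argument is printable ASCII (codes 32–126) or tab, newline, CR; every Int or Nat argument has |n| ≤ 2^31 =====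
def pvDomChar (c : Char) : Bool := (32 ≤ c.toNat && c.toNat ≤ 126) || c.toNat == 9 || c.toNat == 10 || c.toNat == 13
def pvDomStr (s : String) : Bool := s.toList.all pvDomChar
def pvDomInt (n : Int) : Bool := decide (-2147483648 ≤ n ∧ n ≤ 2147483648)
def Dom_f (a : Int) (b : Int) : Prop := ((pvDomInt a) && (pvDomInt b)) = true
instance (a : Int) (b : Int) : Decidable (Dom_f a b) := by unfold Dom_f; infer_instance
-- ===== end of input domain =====

-- B replaces A's self-recursion by an iterative normalization loop with an xor accumulator (objective: alternative).

-- ===== PORT A =====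
-- Python '%' with positive divisor 2 agrees with Lean's Int '%'; Python '^' on ints is PySem.Int.bxor.
-- The final 'else 0' is unreachable (a % 2 is always 0 or 1), mirroring Python's fall-through.
def f (a : Int) (b : Int) : Int :=
  if a = b then a
  else if a % 2 = 1 ∧ b % 2 = 1 then 1
  else if a % 2 = 0 ∧ b % 2 = 0 then 0
  else if a % 2 = 1 ∧ b % 2 = 0 then f (a + 1) b
  else if a % 2 = 0 ∧ b % 2 = 1 then PySem.Int.bxor (f a (b - 1)) b
  else 0
termination_by ((a % 2) - (b % 2)).natAbs
decreasing_by all_goals omega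

-- ===== PORT B =====
-- Source B's 'while True' loop over its mutable state (acc, a, b), as fuel-indexed structural
-- recursion (the fuel is only a totality guard: 2 iterations always suffice, see fLoop_fuel below).
def fLoop : Nat → Int → Int → Int → Int
  | 0, _, _, _ => 0
  | fuel + 1, acc, a, b =>
    if a = b then PySem.Int.bxor a acc
    else
      let pa := a % 2
      let pb := b % 2
      if pa = pb then PySem.Int.bxor pa acc
      else if pa = 1 then fLoop fuel acc (a + 1) b
      else fLoop fuel (PySem.Int.bxor acc b) a (b - 1)

def f_alt (a : Int) (b : Int) : Int := fLoop 2 0 a b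

-- ===== PRECONDITION & SPEC =====
def Spec_f (a : Int) (b : Int) (out : Int) : Prop := out = f_alt a b
instance (a : Int) (b : Int) (out : Int) : Decidable (Spec_f a b out) := by unfold Spec_f; infer_instance

-- ===== CLAIM (what is proved, stated in full; the proofs are below) =====
def Claim_equal_f : Prop := ∀ (a : Int) (b : Int), Dom_f a b → Spec_f a b (f a b)

-- ===== LEMMAS AND PROOFS =====
-- The loop reaches a return within 2 iterations: one mixed-parity step makes both parities equal.
theorem fLoop_fuel (a b : Int) : fLoop 2 0 a b = f a b := by
  rw [f]
  unfold fLoop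
  have ha : a % 2 = 0 ∨ a % 2 = 1 := by omega
  have hb : b % 2 = 0 ∨ b % 2 = 1 := by omega
  by_cases hab : a = b
  · simp [hab]
  · rcases ha with ha | ha <;> rcases hb with hb | hb
    · simp [hab, ha, hb]
    · -- a even, b odd: fold b into the accumulator, decrement b; next state has equal parities
      have hb' : (b - 1) % 2 = 0 := by omega
      simp only [hab, ha, hb]
      norm_num [fLoop, hb']
      by_cases h : a = b - 1
      · rw [f]
        simp [h, PySem.Int.bxor_comm 0 b]
      · rw [f]
        simp [h, ha, hb', PySem.Int.bxor_comm 0 b]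
    · -- a odd, b even: increment a; next state has equal parities
      have ha' : (a + 1) % 2 = 0 := by omega
      simp only [hab, ha, hb]
      norm_num [fLoop, ha']
      by_cases h : a + 1 = b
      · rw [f]
        simp [h]
      · rw [f]
        simp [h, ha', hb]
    · simp [hab, ha, hb]

-- ===== VERDICT (by name: the statement is the Claim_ definition above) =====
theorem f_spec : Claim_equal_f := by
  intro a b _
  unfold Spec_f f_alt
  rw [fLoop_fuel]
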